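-- pv_equiv track=rewrite | github.com/Paul-Andre/Competitive | Kattis/previous/guessthedatastructure.py | tryPriority
-- ===== SOURCE A (Python) =====
-- import heapq
--
-- def tryPriority(commands):
--     l = list()
--     for com,elem in commands:
--         if com==1:
--             heapq.heappush(l, -elem)
--         if com==2:
--             try:
--                 ee = -heapq.heappop(l)
--             except IndexError:
--                 return False
--             if ee!=elem:
--                 return False
--     return True
-- ===== SOURCE B (Python) =====
-- def tryPriority(commands):
--     # Failure-propagating state machine over a plain list: state becomes None
--     # the moment a pop is inconsistent; pop checks max by a linear scan.
--     state = []
--     for com, elem in commands: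
--         if state is None:
--             break
--         if com == 1:
--             state = state + [elem]
--         elif com == 2:
--             if state and max(state) == elem:
--                 state.remove(elem)
--             else:
--                 state = None
--     return state is not None
-- ===== Notes on version B (the rewrite author's own statement) =====
-- stated objective: alternative
-- what changed: Replaces A's negated binary heap with early returns by a failure-propagating fold over a plain list: push appends, pop scans for the max and removes its first occurrence, and the state collapses to None on the first inconsistency instead of returning early.
import Mathlib
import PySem

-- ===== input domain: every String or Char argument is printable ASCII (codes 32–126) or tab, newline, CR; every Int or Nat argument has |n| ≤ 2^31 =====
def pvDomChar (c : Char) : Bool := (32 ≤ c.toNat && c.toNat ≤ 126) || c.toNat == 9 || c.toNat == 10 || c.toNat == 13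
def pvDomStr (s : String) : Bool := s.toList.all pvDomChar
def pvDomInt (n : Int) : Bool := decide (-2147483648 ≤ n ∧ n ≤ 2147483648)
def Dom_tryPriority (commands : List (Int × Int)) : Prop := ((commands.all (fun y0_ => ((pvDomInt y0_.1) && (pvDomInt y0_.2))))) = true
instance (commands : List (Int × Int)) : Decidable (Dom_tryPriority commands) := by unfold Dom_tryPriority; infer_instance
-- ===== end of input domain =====

-- B replaces A's negated binary heap with a failure-propagating fold over a plain
-- max-scan list (alternative decomposition); return values proved equal on all inputs.

-- ===== PORT A =====
-- heapq.heappush / heapq.heappop are library calls; they are ported by their priority-queue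
-- contract: the heap list is represented as an ascending sorted list, push = ordered insert,
-- pop = take the head (the minimum — exactly the value heapq.heappop returns; IndexError on
-- the empty heap is the [] branch returning False, as A's except clause does).
def tryPriorityGo (l : List Int) : List (Int × Int) → Bool
  | [] => true
  | (com, elem) :: rest =>
    let l' := if com = 1 then List.orderedInsert (· ≤ ·) (-elem) l else l
    if com = 2 then
      match l' with
      | [] => false                                   -- heappop on empty heap: except IndexError: return False
      | x :: t => if -x ≠ elem then false else tryPriorityGo t rest
    else tryPriorityGo l' rest

def tryPriority (commands : List (Int × Int)) : Bool := tryPriorityGo [] commands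

-- ===== PORT B =====
-- the loop with a None-able state is the fold of one step function over the commands
-- (break on None = the step fixing none); max(state) on a possibly-empty list is
-- PySem.List.max? (none iff empty, matching `state and max(state)==elem`);
-- state.remove(elem) is List.erase (first occurrence; elem = max ∈ state here).
def tryPriorityAltStep (st : Option (List Int)) (ce : Int × Int) : Option (List Int) :=
  match st with
  | none => none
  | some pool =>
    if ce.1 = 1 then some (pool ++ [ce.2])
    else if ce.1 = 2 then
      match PySem.List.max? pool (fun y => y) with
      | some m => if m = ce.2 then some (pool.erase ce.2) else none
      | none => none
    else some pool

def tryPriority_alt (commands : List (Int × Int)) : Bool :=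
  (commands.foldl tryPriorityAltStep (some [])).isSome

-- ===== PRECONDITION & SPEC =====
def Spec_tryPriority (commands : List (Int × Int)) (out : Bool) : Prop := out = tryPriority_alt commands
instance (commands : List (Int × Int)) (out : Bool) : Decidable (Spec_tryPriority commands out) := by unfold Spec_tryPriority; infer_instance

-- ===== CLAIM (what is proved, stated in full; the proofs are below) =====
def Claim_equal_tryPriority : Prop := ∀ (commands : List (Int × Int)), Dom_tryPriority commands → Spec_tryPriority commands (tryPriority commands)

-- ===== LEMMAS AND PROOFS =====

-- once B's state has collapsed to none it stays none
theorem foldl_step_none (cmds : List (Int × Int)) :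
    cmds.foldl tryPriorityAltStep none = none := by
  induction cmds with
  | nil => rfl
  | cons c r ih => simpa [tryPriorityAltStep] using ih

-- Invariant: A's heap list (sorted ascending) holds the negations of B's plain list, as multisets.
theorem go_eq_fold (cmds : List (Int × Int)) : ∀ (lA lB : List Int),
    lA.Pairwise (· ≤ ·) → (lA.map (-·)).Perm lB →
    tryPriorityGo lA cmds = (cmds.foldl tryPriorityAltStep (some lB)).isSome := by
  induction cmds with
  | nil => intro lA lB _ _; rfl
  | cons c rest ih =>
    obtain ⟨com, elem⟩ := c
    intro lA lB hs hp
    by_cases h1 : com = 1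
    · have h2 : com ≠ 2 := by omega
      subst h1
      simp only [tryPriorityGo, List.foldl_cons, tryPriorityAltStep, reduceIte]
      exact ih _ _ (List.Pairwise.orderedInsert _ _ hs)
        (((List.perm_orderedInsert _ _ lA).map (-·)).trans
          (by simpa using ((hp.cons elem).trans (List.perm_append_singleton elem lB).symm)))
    · by_cases h2 : com = 2
      · subst h2
        simp only [tryPriorityGo, List.foldl_cons, tryPriorityAltStep, reduceIte, if_neg h1]
        match hA : lA, hB : lB with
        | [], [] => simp [PySem.List.max?, foldl_step_none]
        | [], x :: t => exact absurd (hp.length_eq) (by simp)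
        | a :: tA, [] => exact absurd (hp.length_eq) (by simp)
        | a :: tA, x :: tB =>
          have hmax : PySem.List.max? (x :: tB) (fun y => y) = some (tB.foldl max x) :=
            PySem.List.max?_id_cons x tB
          have hmem : tB.foldl max x ∈ (x :: tB) := PySem.List.max?_mem hmax
          have hub : ∀ y ∈ (x :: tB), y ≤ tB.foldl max x := PySem.List.max?_isMax hmax
          have hamin : ∀ y ∈ a :: tA, a ≤ y := by
            intro y hy
            rcases List.mem_cons.mp hy with h | h
            · omega
            · exact List.rel_of_pairwise_cons hs h
          have hkey : tB.foldl max x = -a := by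
            have h1' : -a ∈ x :: tB := hp.mem_iff.mp (by simp)
            have h2' : -a ≤ tB.foldl max x := hub _ h1'
            have h3' : tB.foldl max x ∈ (a :: tA).map (-·) := hp.mem_iff.mpr hmem
            obtain ⟨b, hb, hb2⟩ := List.mem_map.mp h3'
            have := hamin b hb
            omega
          rw [hmax, hkey]
          by_cases he : -a = elem
          · simp only [he, ne_eq, not_true_eq_false, ite_false, reduceIte]
            apply ih _ _ (List.Pairwise.of_cons hs)
            have : ((x :: tB).erase elem).Perm ((elem :: tA.map (-·)).erase elem) :=
              (List.Perm.erase elem (by simpa [← he] using hp)).symm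
            simpa using this.symm
          · simp [he, foldl_step_none]
      · simp only [tryPriorityGo, List.foldl_cons, tryPriorityAltStep, if_neg h1, if_neg h2]
        exact ih _ _ hs hp

-- ===== VERDICT (by name: the statement is the Claim_ definition above) =====
theorem tryPriority_spec : Claim_equal_tryPriority := by
  intro commands _
  unfold Spec_tryPriority tryPriority tryPriority_alt
  exact go_eq_fold commands [] [] List.Pairwise.nil (by simp)
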